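-- pv_equiv track=rewrite | github.com/Remisaurus/Winc | for/main.py | shortest_names
-- ===== SOURCE A (Python) =====
-- def shortest_names(list):
--     newlist=[]
--     for i in list:
--         if len(i) <= 3:
--             newlist.append(i)
--     if len(newlist) < 1:
--         for i in list:
--           if len(i) == 4:
--             newlist.append(i)
--     if len(newlist) < 1:
--         for i in list:
--           if len(i) == 5:
--             newlist.append(i)
--     return newlist
-- ===== SOURCE B (Python) =====
-- def shortest_names(list):
--     # One pass: bucket each name by length class, then pick first non-empty bucket.
--     buckets = {"le3": [], "eq4": [], "eq5": []}
--     for name in list: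
--         n = len(name)
--         if n <= 3:
--             buckets["le3"].append(name)
--         elif n == 4:
--             buckets["eq4"].append(name)
--         elif n == 5:
--             buckets["eq5"].append(name)
--     for key in ("le3", "eq4", "eq5"):
--         if buckets[key]:
--             return buckets[key]
--     return []
-- ===== Notes on version B (the rewrite author's own statement) =====
-- stated objective: alternative
-- what changed: A makes up to three conditional scans over the input; B makes one pass that buckets every name into three length classes and then selects the first non-empty bucket in priority order.
import Mathlib
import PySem

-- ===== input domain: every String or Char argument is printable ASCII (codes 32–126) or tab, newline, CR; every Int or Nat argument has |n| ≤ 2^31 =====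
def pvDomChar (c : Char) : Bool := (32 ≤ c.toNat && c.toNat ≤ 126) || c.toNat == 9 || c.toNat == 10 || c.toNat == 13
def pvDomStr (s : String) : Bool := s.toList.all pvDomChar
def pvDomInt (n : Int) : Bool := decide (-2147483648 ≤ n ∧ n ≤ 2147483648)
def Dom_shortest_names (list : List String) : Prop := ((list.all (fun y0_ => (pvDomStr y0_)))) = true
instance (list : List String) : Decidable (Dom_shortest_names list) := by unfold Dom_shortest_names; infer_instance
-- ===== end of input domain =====

-- B buckets each name by length class in one pass and selects the first non-empty bucket,
-- instead of A's up-to-three conditional scans; alternative decomposition, same cost.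

-- ===== PORT A =====
def shortest_names (list : List String) : List String :=
  let newlist : List String :=
    list.foldl (fun acc i => if PySem.Str.len i ≤ 3 then acc ++ [i] else acc) []
  let newlist : List String :=
    if newlist.length < 1 then
      list.foldl (fun acc i => if PySem.Str.len i = 4 then acc ++ [i] else acc) newlist
    else newlist
  let newlist : List String :=
    if newlist.length < 1 then
      list.foldl (fun acc i => if PySem.Str.len i = 5 then acc ++ [i] else acc) newlist
    else newlist
  newlist

-- ===== PORT B =====
def shortest_names_alt (list : List String) : List String :=
  let buckets : List String × List String × List String :=
    list.foldl (fun b name =>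
      let n := PySem.Str.len name
      if n ≤ 3 then (b.1 ++ [name], b.2.1, b.2.2)
      else if n = 4 then (b.1, b.2.1 ++ [name], b.2.2)
      else if n = 5 then (b.1, b.2.1, b.2.2 ++ [name])
      else b) ([], [], [])
  if buckets.1 ≠ [] then buckets.1
  else if buckets.2.1 ≠ [] then buckets.2.1
  else if buckets.2.2 ≠ [] then buckets.2.2
  else []

-- ===== PRECONDITION & SPEC =====
def Spec_shortest_names (list : List String) (out : List String) : Prop := out = shortest_names_alt list
instance (list : List String) (out : List String) : Decidable (Spec_shortest_names list out) := by unfold Spec_shortest_names; infer_instance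

-- ===== CLAIM (what is proved, stated in full; the proofs are below) =====
def Claim_equal_shortest_names : Prop := ∀ (list : List String), Dom_shortest_names list → Spec_shortest_names list (shortest_names list)

-- ===== LEMMAS AND PROOFS =====

-- A's append-loop is acc ++ filter.
theorem foldl_append_filter (p : String → Prop) [DecidablePred p] (l acc : List String) :
    l.foldl (fun a i => if p i then a ++ [i] else a) acc
      = acc ++ l.filter (fun i => decide (p i)) := by
  induction l generalizing acc with
  | nil => simp
  | cons x xs ih =>
    simp only [List.foldl_cons, List.filter_cons]
    by_cases h : p x <;> simp [h, ih]

-- B's bucket loop computes the three (ordered) filters.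
theorem foldl_buckets (p1 p2 p3 : String → Prop) [DecidablePred p1] [DecidablePred p2]
    [DecidablePred p3] (l : List String) (a b c : List String) :
    l.foldl (fun b name =>
      if p1 name then (b.1 ++ [name], b.2.1, b.2.2)
      else if p2 name then (b.1, b.2.1 ++ [name], b.2.2)
      else if p3 name then (b.1, b.2.1, b.2.2 ++ [name])
      else b) (a, b, c)
    = (a ++ l.filter (fun i => decide (p1 i)),
       b ++ l.filter (fun i => decide (¬ p1 i ∧ p2 i)),
       c ++ l.filter (fun i => decide (¬ p1 i ∧ ¬ p2 i ∧ p3 i))) := by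
  induction l generalizing a b c with
  | nil => simp
  | cons x xs ih =>
    simp only [List.foldl_cons, List.filter_cons]
    by_cases h1 : p1 x
    · simp [h1, ih]
    · by_cases h2 : p2 x
      · simp [h1, h2, ih]
      · by_cases h3 : p3 x <;> simp [h1, h2, h3, ih]

-- ===== VERDICT (by name: the statement is the Claim_ definition above) =====
theorem shortest_names_spec : Claim_equal_shortest_names := by
  intro list _
  unfold Spec_shortest_names
  simp only [shortest_names, shortest_names_alt,
    foldl_append_filter (fun i => PySem.Str.len i ≤ 3),
    foldl_append_filter (fun i => PySem.Str.len i = 4),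
    foldl_append_filter (fun i => PySem.Str.len i = 5),
    foldl_buckets (fun i => PySem.Str.len i ≤ 3) (fun i => PySem.Str.len i = 4)
      (fun i => PySem.Str.len i = 5),
    List.nil_append]
  have e4 : list.filter (fun i => decide (¬ PySem.Str.len i ≤ 3 ∧ PySem.Str.len i = 4))
      = list.filter (fun i => decide (PySem.Str.len i = 4)) := by
    refine List.filter_congr (fun i _ => ?_)
    simp
    omega
  have e5 : list.filter
        (fun i => decide (¬ PySem.Str.len i ≤ 3 ∧ ¬ PySem.Str.len i = 4 ∧ PySem.Str.len i = 5))
      = list.filter (fun i => decide (PySem.Str.len i = 5)) := by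
    refine List.filter_congr (fun i _ => ?_)
    by_cases h5 : (i.length : Int) = 5
    · simp [h5]
    · simp [h5]
  rw [e4, e5]
  set f3 := list.filter (fun i => decide (PySem.Str.len i ≤ 3)) with hf3
  set f4 := list.filter (fun i => decide (PySem.Str.len i = 4)) with hf4
  set f5 := list.filter (fun i => decide (PySem.Str.len i = 5)) with hf5
  by_cases h3 : f3 = []
  · by_cases h4 : f4 = []
    · by_cases h5 : f5 = [] <;>
        simp [h3, h4, h5]
    · simp [h3, h4]
  · have hl : ¬ f3.length < 1 := by
      simp [List.length_eq_zero_iff, h3]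
    simp [hl, h3]
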